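-- pv_equiv track=rewrite | github.com/dilliawan3088/evren-ai-chatbot | evren_filter.py | is_evren_related
-- ===== SOURCE A (Python) =====
-- def is_evren_related(question: str) -> bool:
--     evren_keywords = [
--         "evren ai", "evren", "bootcamp", "courses", "team", "mission",
--         "ai training", "vision", "objectives", "platform", "founder",
--         "services", "projects", "pricing", "contact", "career",
--         "website", "KPIs", "kpi", "key performance indicators","location"
--     ]
--     return any(keyword in question.lower() for keyword in evren_keywords)
-- ===== SOURCE B (Python) =====
-- def is_evren_related(question: str) -> bool:
--     keywords = (
--         "evren ai", "evren", "bootcamp", "courses", "team", "mission",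
--         "ai training", "vision", "objectives", "platform", "founder",
--         "services", "projects", "pricing", "contact", "career",
--         "website", "KPIs", "kpi", "key performance indicators", "location"
--     )
--     text = question.lower()
--     for i in range(len(text)):
--         if any(text.startswith(k, i) for k in keywords):
--             return True
--     return False
-- ===== Notes on version B (the rewrite author's own statement) =====
-- stated objective: alternative
-- what changed: Replaces the per-keyword substring-membership loop (one full 'in' search of the text per keyword) with a single left-to-right positional scan that tests all keywords as prefixes at each position, returning at the first hit.
import Mathlib
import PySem

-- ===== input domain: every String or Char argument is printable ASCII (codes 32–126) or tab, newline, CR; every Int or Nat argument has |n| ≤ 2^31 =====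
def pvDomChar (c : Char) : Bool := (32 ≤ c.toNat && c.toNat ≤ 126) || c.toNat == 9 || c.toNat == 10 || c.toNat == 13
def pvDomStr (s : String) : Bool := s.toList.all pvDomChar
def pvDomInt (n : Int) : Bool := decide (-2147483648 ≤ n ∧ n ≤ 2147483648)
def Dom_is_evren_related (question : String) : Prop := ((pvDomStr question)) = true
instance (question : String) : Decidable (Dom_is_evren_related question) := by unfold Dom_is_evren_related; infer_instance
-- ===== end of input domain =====

-- B replaces A's per-keyword substring-membership loop with a single left-to-right
-- positional scan testing all keywords as prefixes at each position (alternative, same cost).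

-- ===== PORT A =====
-- A's keyword list, verbatim
def evrenKeywords : List String :=
  ["evren ai", "evren", "bootcamp", "courses", "team", "mission",
   "ai training", "vision", "objectives", "platform", "founder",
   "services", "projects", "pricing", "contact", "career",
   "website", "KPIs", "kpi", "key performance indicators", "location"]

-- any(keyword in question.lower() for keyword in evren_keywords)
def is_evren_related (question : String) : Bool :=
  evrenKeywords.any (fun keyword => PySem.Str.isIn keyword (PySem.Str.lower question))

-- ===== PORT B =====
-- B's keyword tuple, as code-point lists (B works on the lowered character sequence)
def evrenKeywordsB : List (List Char) :=
  ["evren ai".toList, "evren".toList, "bootcamp".toList, "courses".toList, "team".toList,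
   "mission".toList, "ai training".toList, "vision".toList, "objectives".toList,
   "platform".toList, "founder".toList, "services".toList, "projects".toList,
   "pricing".toList, "contact".toList, "career".toList, "website".toList,
   "KPIs".toList, "kpi".toList, "key performance indicators".toList, "location".toList]

-- the position loop: at each position i (= each suffix) test every keyword as a prefix
def evrenScan (kws : List (List Char)) : List Char → Bool
  | [] => false
  | c :: rest =>
    if kws.any (fun k => PySem.Chars.startswith (c :: rest) k) then true
    else evrenScan kws rest

def is_evren_related_alt (question : String) : Bool :=
  evrenScan evrenKeywordsB (PySem.Chars.lower question.toList)

-- ===== PRECONDITION & SPEC =====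
def Spec_is_evren_related (question : String) (out : Bool) : Prop := out = is_evren_related_alt question
instance (question : String) (out : Bool) : Decidable (Spec_is_evren_related question out) := by unfold Spec_is_evren_related; infer_instance

-- ===== CLAIM (what is proved, stated in full; the proofs are below) =====
def Claim_equal_is_evren_related : Prop := ∀ (question : String), Dom_is_evren_related question → Spec_is_evren_related question (is_evren_related question)

-- ===== LEMMAS AND PROOFS =====

-- the positional scan finds exactly the keywords occurring as substrings (keywords nonempty)
theorem evrenScan_eq_any_isIn (kws : List (List Char)) (h : ∀ k ∈ kws, k ≠ []) :
    ∀ s : List Char, evrenScan kws s = kws.any (fun k => PySem.Chars.isIn k s) := by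
  intro s
  induction s with
  | nil =>
    rw [show evrenScan kws [] = false from rfl]
    symm
    simp only [List.any_eq_false]
    intro k hk
    simp only [Bool.not_eq_true, PySem.Chars.isIn_eq_false_iff, List.infix_nil]
    exact h k hk
  | cons c rest ih =>
    rw [show evrenScan kws (c :: rest) =
          (if kws.any (fun k => PySem.Chars.startswith (c :: rest) k) then true
           else evrenScan kws rest) from rfl, ih, Bool.eq_iff_iff]
    by_cases hany : ∃ k ∈ kws, k <+: c :: rest
    · have ht : kws.any (fun k => PySem.Chars.startswith (c :: rest) k) = true := by
        simp only [List.any_eq_true, PySem.Chars.startswith_iff]; exact hany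
      rw [ht, if_pos rfl]
      obtain ⟨k, hk, hp⟩ := hany
      simp only [true_iff, List.any_eq_true, PySem.Chars.isIn_iff_infix]
      exact ⟨k, hk, hp.isInfix⟩
    · have hf : kws.any (fun k => PySem.Chars.startswith (c :: rest) k) = false := by
        simp only [List.any_eq_false, PySem.Chars.startswith_iff]
        intro k hk hp
        exact hany ⟨k, hk, hp⟩
      rw [hf]
      simp only [Bool.false_eq_true, if_false]
      simp only [List.any_eq_true, PySem.Chars.isIn_iff_infix, List.infix_cons_iff]
      constructor
      · rintro ⟨k, hk, hi⟩; exact ⟨k, hk, Or.inr hi⟩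
      · rintro ⟨k, hk, hi | hi⟩
        · exact absurd ⟨k, hk, hi⟩ hany
        · exact ⟨k, hk, hi⟩

theorem evrenKeywordsB_eq : evrenKeywordsB = evrenKeywords.map String.toList := by decide

-- ===== VERDICT (by name: the statement is the Claim_ definition above) =====
theorem is_evren_related_spec : Claim_equal_is_evren_related := by
  intro question _
  unfold Spec_is_evren_related is_evren_related is_evren_related_alt
  rw [evrenScan_eq_any_isIn _ (by decide), evrenKeywordsB_eq, List.any_map]
  simp [PySem.Str.isIn_eq, PySem.Str.toList_lower, Function.comp_def]
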